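-- pv_equiv track=rewrite | github.com/Aashiq-Edavalapati/Data-Structures-and-Algorithms | Patterns/Binary Search/_20_Painters_Partition.py | minMaxSum
-- ===== SOURCE A (Python) =====
-- def numPartitions(arr, maxSum):
--     """
--     Given a max allowed sum (maxSum), return the number of partitions needed
--     so that no partition exceeds maxSum.
--     """
--     currSum = arr[0]
--     i = 1
--     partitions = 1  # start with the first partition
--
--     while i < len(arr):
--         currSum += arr[i]
--         # If adding this element exceeds maxSum, start a new partition
--         if currSum > maxSum:
--             currSum = arr[i]
--             partitions += 1
--         i += 1
--
--     return partitions
--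
-- def minMaxSum(arr, k):
--     """
--     Find the minimum possible largest sum when splitting array into ≤ k partitions.
--     """
--     left, right = max(arr), sum(arr)
--
--     while left <= right:
--         mid = left + (right - left) // 2
--
--         if numPartitions(arr, mid) <= k:
--             # If we can split within k partitions, try smaller max sum
--             right = mid - 1
--         else:
--             # Otherwise, need to allow larger max sum
--             left = mid + 1
--
--     # The minimum largest sum is stored in `left`
--     return left
-- ===== SOURCE B (Python) =====
-- def minMaxSum(arr, k):
--     """
--     Minimum possible largest partition sum for <= k contiguous partitions,
--     via a prefix-sum table queried by a recursive bisection.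
--     """
--     prefix = [0]
--     for x in arr:
--         prefix.append(prefix[-1] + x)
--
--     def within(cap):
--         # greedy partition count computed from prefix-sum differences
--         groups, base = 1, 0
--         for i in range(1, len(arr)):
--             if prefix[i + 1] - prefix[base] > cap:
--                 groups, base = groups + 1, i
--         return groups <= k
--
--     def search(lo, hi):
--         if lo > hi:
--             return lo
--         mid = lo + (hi - lo) // 2
--         return search(lo, mid - 1) if within(mid) else search(mid + 1, hi)
--
--     return search(max(arr), prefix[-1])
-- ===== Notes on version B (the rewrite author's own statement) =====
-- stated objective: alternative
-- what changed: Replaces the iterative while-loop bisection with a recursive bisection over the same midpoints, and replaces the running-sum greedy counter by a prefix-sum table built once, so each probe counts partitions by prefix-sum differences against the last cut position instead of re-accumulating a current sum; exact probe sequence is preserved (required because the greedy count is non-monotone on arrays with negative elements, making the result probe-path dependent).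
import Mathlib
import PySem

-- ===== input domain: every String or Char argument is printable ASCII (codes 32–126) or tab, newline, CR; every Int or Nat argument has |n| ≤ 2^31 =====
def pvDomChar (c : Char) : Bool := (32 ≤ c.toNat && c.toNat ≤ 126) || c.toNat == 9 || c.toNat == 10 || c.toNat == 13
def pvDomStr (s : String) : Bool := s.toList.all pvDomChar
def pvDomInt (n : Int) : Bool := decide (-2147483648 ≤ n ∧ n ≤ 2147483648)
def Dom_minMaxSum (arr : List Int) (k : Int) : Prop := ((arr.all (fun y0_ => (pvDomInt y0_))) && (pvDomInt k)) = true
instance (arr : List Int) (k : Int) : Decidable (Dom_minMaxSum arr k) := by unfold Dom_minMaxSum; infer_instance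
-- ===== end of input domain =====

-- B replaces the while-loop bisection by a recursive bisection over the same midpoints and the
-- running-sum greedy counter by a prefix-sum table queried by differences; return value only.


-- ===== PORT A =====
-- numPartitions: while i < len(arr) with i += 1 starting at i = 1, i.e. a fold over range(1, len(arr));
-- state = (currSum, partitions)
def numPartitions (arr : List Int) (maxSum : Int) : Int :=
  ((PySem.List.pyRange 1 arr.length 1).foldl
    (fun (st : Int × Int) i =>
      let currSum := st.1 + PySem.List.pyGetD arr i 0
      if currSum > maxSum then (PySem.List.pyGetD arr i 0, st.2 + 1)
      else (currSum, st.2))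
    (PySem.List.pyGetD arr 0 0, 1)).2

-- the while left <= right loop of minMaxSum
def minMaxSumLoop (arr : List Int) (k left right : Int) : Int :=
  if left ≤ right then
    let mid := left + PySem.Int.floordiv (right - left) 2
    if numPartitions arr mid ≤ k then minMaxSumLoop arr k left (mid - 1)
    else minMaxSumLoop arr k (mid + 1) right
  else left
termination_by (right + 1 - left).toNat
decreasing_by
  · have h2 : PySem.Int.floordiv (right - left) 2 = (right - left) / 2 :=
      PySem.Int.floordiv_eq_ediv_of_pos (by omega)
    rw [h2] at *; omega
  · have h2 : PySem.Int.floordiv (right - left) 2 = (right - left) / 2 :=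
      PySem.Int.floordiv_eq_ediv_of_pos (by omega)
    rw [h2] at *; omega

-- left, right = max(arr), sum(arr)  (max(arr) raises ValueError on [], excluded by Pre_)
def minMaxSum (arr : List Int) (k : Int) : Int :=
  minMaxSumLoop arr k ((PySem.List.max? arr (fun y => y)).getD 0) arr.sum

-- ===== PORT B =====
-- prefix = [0]; for x in arr: prefix.append(prefix[-1] + x)
def pvPrefix (arr : List Int) : List Int :=
  arr.foldl (fun p x => p ++ [PySem.List.pyGetD p (-1) 0 + x]) [0]

-- within(cap): greedy partition count via prefix-sum differences; state = (groups, base)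
def pvWithin (arr : List Int) (pfx : List Int) (k cap : Int) : Bool :=
  (((PySem.List.pyRange 1 arr.length 1).foldl
    (fun (st : Int × Int) i =>
      if PySem.List.pyGetD pfx (i + 1) 0 - PySem.List.pyGetD pfx st.2 0 > cap
      then (st.1 + 1, i) else st)
    (1, 0)).1) ≤ k

-- recursive bisection
def pvSearch (arr : List Int) (pfx : List Int) (k lo hi : Int) : Int :=
  if lo > hi then lo
  else
    let mid := lo + PySem.Int.floordiv (hi - lo) 2
    if pvWithin arr pfx k mid then pvSearch arr pfx k lo (mid - 1)
    else pvSearch arr pfx k (mid + 1) hi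
termination_by (hi + 1 - lo).toNat
decreasing_by
  · have h2 : PySem.Int.floordiv (hi - lo) 2 = (hi - lo) / 2 :=
      PySem.Int.floordiv_eq_ediv_of_pos (by omega)
    rw [h2] at *; omega
  · have h2 : PySem.Int.floordiv (hi - lo) 2 = (hi - lo) / 2 :=
      PySem.Int.floordiv_eq_ediv_of_pos (by omega)
    rw [h2] at *; omega

def minMaxSum_alt (arr : List Int) (k : Int) : Int :=
  let pfx := pvPrefix arr
  pvSearch arr pfx k ((PySem.List.max? arr (fun y => y)).getD 0)
    (PySem.List.pyGetD pfx (-1) 0)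

-- ===== PRECONDITION & SPEC =====
-- Pre_ excludes only the empty list, on which A raises ValueError (max of empty sequence).
def Pre_minMaxSum (arr : List Int) (k : Int) : Prop := arr ≠ []
instance (arr : List Int) (k : Int) : Decidable (Pre_minMaxSum arr k) := by
  unfold Pre_minMaxSum; infer_instance

def pvWitness_minMaxSum : List Int × Int := ([3, 1, 2], 2)

def Spec_minMaxSum (arr : List Int) (k : Int) (out : Int) : Prop := out = minMaxSum_alt arr k
instance (arr : List Int) (k : Int) (out : Int) : Decidable (Spec_minMaxSum arr k out) := by
  unfold Spec_minMaxSum; infer_instance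

-- ===== CLAIM (what is proved, stated in full; the proofs are below) =====
def Claim_equal_minMaxSum : Prop := ∀ (arr : List Int) (k : Int), Dom_minMaxSum arr k → Pre_minMaxSum arr k → Spec_minMaxSum arr k (minMaxSum arr k)

-- ===== LEMMAS AND PROOFS =====

-- prefix sums from a running start
def pvPfxFrom (s : Int) : List Int → List Int
  | [] => []
  | x :: t => (s + x) :: pvPfxFrom (s + x) t

theorem pvPrefix_go (arr : List Int) :
    ∀ (p : List Int) (s : Int), p ≠ [] → p.getLast? = some s →
    arr.foldl (fun p x => p ++ [PySem.List.pyGetD p (-1) 0 + x]) p = p ++ pvPfxFrom s arr := by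
  induction arr with
  | nil => intro p s _ _; simp [pvPfxFrom]
  | cons x t ih =>
    intro p s hp hl
    simp only [List.foldl_cons, pvPfxFrom]
    have hget : PySem.List.pyGetD p (-1) 0 = s := by
      rw [PySem.List.pyGetD_neg_one p 0 hp]
      have hsome : p.getLast? = some (p.getLast hp) := List.getLast?_eq_getLast hp
      rw [hsome] at hl; exact Option.some_injective _ hl
    rw [hget]
    rw [ih (p ++ [s + x]) (s + x) (by simp) (by simp)]
    simp

theorem pvPrefix_eq (arr : List Int) : pvPrefix arr = 0 :: pvPfxFrom 0 arr := by
  have := pvPrefix_go arr [0] 0 (by simp) (by simp)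
  simpa [pvPrefix] using this

theorem pvPfxFrom_get (arr : List Int) :
    ∀ (j : Nat) (s : Int), j < arr.length → (pvPfxFrom s arr)[j]? = some (s + (arr.take (j+1)).sum) := by
  induction arr with
  | nil => intro j s h; simp at h
  | cons x t ih =>
    intro j s h
    cases j with
    | zero => simp [pvPfxFrom]
    | succ j' =>
      simp only [pvPfxFrom, List.getElem?_cons_succ]
      rw [ih j' (s + x) (by simpa using h)]
      simp [List.take_succ_cons]
      ring

theorem pvPrefix_getD (arr : List Int) (j : Nat) (hj : j ≤ arr.length) :
    PySem.List.pyGetD (pvPrefix arr) (j : Int) 0 = (arr.take j).sum := by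
  rw [pvPrefix_eq]
  cases j with
  | zero => simp [PySem.List.pyGetD_zero]
  | succ j' =>
    have hlen : (pvPfxFrom 0 arr)[j']? = some (0 + (arr.take (j'+1)).sum) :=
      pvPfxFrom_get arr j' 0 (by omega)
    have : ((0 : Int) :: pvPfxFrom 0 arr)[(j'+1 : Nat)]? = some ((arr.take (j'+1)).sum) := by
      simpa using hlen
    rw [show ((j'+1 : Nat) : Int) = ((j'+1 : Nat) : Int) from rfl]
    rw [PySem.List.pyGetD, PySem.List.pyGet?_natCast]
    rw [this]
    rfl

theorem pvPrefix_length (arr : List Int) : (pvPrefix arr).length = arr.length + 1 := by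
  rw [pvPrefix_eq]
  have h : ∀ (t : List Int) (s : Int), (pvPfxFrom s t).length = t.length := by
    intro t; induction t with
    | nil => intro s; simp [pvPfxFrom]
    | cons x t ih => intro s; simp [pvPfxFrom, ih]
  simp [h]

theorem pvPrefix_last (arr : List Int) :
    PySem.List.pyGetD (pvPrefix arr) (-1) 0 = arr.sum := by
  have hne : pvPrefix arr ≠ [] := by rw [pvPrefix_eq]; simp
  rw [PySem.List.pyGetD_neg_one _ 0 hne]
  have h1 : (pvPrefix arr).getLast hne = (pvPrefix arr).getLast?.getD 0 := by
    have hsome : (pvPrefix arr).getLast? = some ((pvPrefix arr).getLast hne) := List.getLast?_eq_getLast hne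
    rw [hsome]; rfl
  rw [h1]
  have h2 : (pvPrefix arr).getLast? = (pvPrefix arr)[arr.length]? := by
    rw [List.getLast?_eq_getElem?, pvPrefix_length]; simp
  rw [h2]
  have h3 := pvPrefix_getD arr arr.length (le_refl _)
  rw [PySem.List.pyGetD, PySem.List.pyGet?_natCast] at h3
  cases hx : (pvPrefix arr)[arr.length]? with
  | none => rw [hx] at h3; simp at h3; simp [← h3]
  | some v => rw [hx] at h3; simp at h3; simp [h3]

-- joint invariant of the two counters over range(1, i)
theorem pvCounter_inv (arr : List Int) (cap : Int) (harr : arr ≠ []) :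
    ∀ (i : Nat), 1 ≤ i → i ≤ arr.length →
    ∃ (b : Nat), b < i ∧
      ((PySem.List.pyRange 1 (i : Int) 1).foldl
        (fun (st : Int × Int) j =>
          let currSum := st.1 + PySem.List.pyGetD arr j 0
          if currSum > cap then (PySem.List.pyGetD arr j 0, st.2 + 1)
          else (currSum, st.2))
        (PySem.List.pyGetD arr 0 0, 1))
      = ((arr.take i).sum - (arr.take b).sum,
        (((PySem.List.pyRange 1 (i : Int) 1).foldl
          (fun (st : Int × Int) j =>
            if PySem.List.pyGetD (pvPrefix arr) (j + 1) 0 - PySem.List.pyGetD (pvPrefix arr) st.2 0 > cap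
            then (st.1 + 1, j) else st)
          (1, 0)).1))
      ∧ ((PySem.List.pyRange 1 (i : Int) 1).foldl
          (fun (st : Int × Int) j =>
            if PySem.List.pyGetD (pvPrefix arr) (j + 1) 0 - PySem.List.pyGetD (pvPrefix arr) st.2 0 > cap
            then (st.1 + 1, j) else st)
          (1, 0)).2 = (b : Int) := by
  intro i
  induction i with
  | zero => intro h; omega
  | succ i ih =>
    intro _ hle
    by_cases hi : i = 0
    · subst hi
      refine ⟨0, by omega, ?_, ?_⟩
      · rw [show ((1 : Nat) : Int) = 1 from rfl, PySem.List.pyRange_one_eq_nil (by omega)]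
        simp only [List.foldl_nil]
        have h0 : PySem.List.pyGetD arr 0 0 = (arr.take 1).sum - (arr.take 0).sum := by
          cases arr with
          | nil => exact absurd rfl harr
          | cons x t => simp [PySem.List.pyGetD_zero]
        rw [h0]
      · rw [show ((1 : Nat) : Int) = 1 from rfl, PySem.List.pyRange_one_eq_nil (by omega)]
        simp
    · -- i ≥ 1: peel the last index i from range(1, i+1)
      obtain ⟨b, hb, hA, hB⟩ := ih (by omega) (by omega)
      have hsplit : PySem.List.pyRange 1 ((i + 1 : Nat) : Int) 1
          = PySem.List.pyRange 1 (i : Int) 1 ++ [(i : Int)] := by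
        have hcast : ((i + 1 : Nat) : Int) = (i : Int) + 1 := by push_cast; ring
        rw [hcast, PySem.List.pyRange_one_succ_right (by omega)]
      have hgi : PySem.List.pyGetD arr (i : Int) 0 = (arr.take (i+1)).sum - (arr.take i).sum := by
        rw [PySem.List.pyGetD, PySem.List.pyGet?_natCast]
        have hilt : i < arr.length := by omega
        rw [List.getElem?_eq_getElem hilt]
        have hst := List.sum_take_succ arr i hilt
        simp [hst]
      have hp1 : PySem.List.pyGetD (pvPrefix arr) ((i : Int) + 1) 0 = (arr.take (i+1)).sum := by
        have hcast : ((i : Int) + 1) = ((i + 1 : Nat) : Int) := by push_cast; ring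
        rw [hcast, pvPrefix_getD arr (i+1) (by omega)]
      have hpb : PySem.List.pyGetD (pvPrefix arr) ((b : Nat) : Int) 0 = (arr.take b).sum :=
        pvPrefix_getD arr b (by omega)
      refine ⟨if (arr.take (i+1)).sum - (arr.take b).sum > cap then i else b, ?_, ?_, ?_⟩
      · split_ifs with hc <;> omega
      · rw [hsplit, List.foldl_append, List.foldl_append, hA]
        simp only [List.foldl_cons, List.foldl_nil]
        rw [hB, hgi, hp1, hpb]
        have harith : (arr.take i).sum - (arr.take b).sum + ((arr.take (i+1)).sum - (arr.take i).sum)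
            = (arr.take (i+1)).sum - (arr.take b).sum := by ring
        rw [harith]
        split_ifs with hc
        · rfl
        · rfl
      · rw [hsplit, List.foldl_append]
        simp only [List.foldl_cons, List.foldl_nil]
        rw [hB, hp1, hpb]
        split_ifs with hc
        · simp
        · exact hB

theorem pvWithin_eq (arr : List Int) (k cap : Int) (harr : arr ≠ []) :
    pvWithin arr (pvPrefix arr) k cap = decide (numPartitions arr cap ≤ k) := by
  by_cases h1 : arr.length ≤ 1
  · -- range(1, len) is empty
    have hr : PySem.List.pyRange 1 (arr.length : Int) 1 = [] :=
      PySem.List.pyRange_one_eq_nil (by exact_mod_cast h1)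
    simp [pvWithin, numPartitions, hr]
  · obtain ⟨b, _, hA, _⟩ := pvCounter_inv arr cap harr arr.length (by omega) (le_refl _)
    unfold pvWithin numPartitions
    simp only [hA]

-- the two bisections agree once the probe predicate agrees pointwise
theorem pvSearch_eq (arr pfx' : List Int) (k : Int)
    (hpred : ∀ cap, pvWithin arr pfx' k cap = decide (numPartitions arr cap ≤ k)) :
    ∀ (l r : Int), minMaxSumLoop arr k l r = pvSearch arr pfx' k l r := by
  intro l r
  induction l, r using minMaxSumLoop.induct arr k with
  | case1 l r hle mid hcond ih =>
    rw [minMaxSumLoop, pvSearch]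
    simp only [hpred, decide_eq_true_eq]
    rw [if_pos hle, if_neg (show ¬ l > r by omega), if_pos hcond, if_pos hcond]
    exact ih
  | case2 l r hle mid hcond ih =>
    rw [minMaxSumLoop, pvSearch]
    simp only [hpred, decide_eq_true_eq]
    rw [if_pos hle, if_neg (show ¬ l > r by omega), if_neg hcond, if_neg hcond]
    exact ih
  | case3 l r hgt =>
    rw [minMaxSumLoop, pvSearch]
    rw [if_neg hgt, if_pos (show l > r by omega)]

-- ===== VERDICT (by name: the statement is the Claim_ definition above) =====
theorem minMaxSum_spec : Claim_equal_minMaxSum := by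
  intro arr k _ hpre
  unfold Spec_minMaxSum minMaxSum minMaxSum_alt
  show minMaxSumLoop arr k ((PySem.List.max? arr (fun y => y)).getD 0) arr.sum
      = pvSearch arr (pvPrefix arr) k ((PySem.List.max? arr (fun y => y)).getD 0)
          (PySem.List.pyGetD (pvPrefix arr) (-1) 0)
  rw [pvPrefix_last]
  exact pvSearch_eq arr (pvPrefix arr) k (fun cap => pvWithin_eq arr k cap hpre) _ _
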